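-- pv_equiv track=rewrite | github.com/Sanieeme/pythonJan | data_structures_v2.py | find_common_skills
-- ===== SOURCE A (Python) =====
-- def find_common_skills(applicants: dict[str, list[str]]) -> set[str]:
--     common_skills = None
--
--     for skills in applicants.values():
--         if common_skills is None:
--             common_skills = set(skills)
--         else:
--             new_common = set()
--             for skill in common_skills:
--                 if skill in skills:
--                     new_common.add(skill)
--             common_skills = new_common
--
--     return common_skills
-- ===== SOURCE B (Python) =====
-- def find_common_skills(applicants: dict[str, list[str]]) -> set[str]:
--     if not applicants:
--         return None
--     values = list(applicants.values())
--     first, rest = values[0], values[1:]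
--     return {skill for skill in first
--             if all(skill in skills for skills in rest)}
-- ===== Notes on version B (the rewrite author's own statement) =====
-- stated objective: simpler
-- what changed: Instead of maintaining a shrinking set and rebuilding it by a nested loop for every applicant, B takes the first applicant's list and keeps each skill with one all() membership check over the remaining lists (skill-major single comprehension instead of applicant-major repeated set rebuilds).
import Mathlib
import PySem

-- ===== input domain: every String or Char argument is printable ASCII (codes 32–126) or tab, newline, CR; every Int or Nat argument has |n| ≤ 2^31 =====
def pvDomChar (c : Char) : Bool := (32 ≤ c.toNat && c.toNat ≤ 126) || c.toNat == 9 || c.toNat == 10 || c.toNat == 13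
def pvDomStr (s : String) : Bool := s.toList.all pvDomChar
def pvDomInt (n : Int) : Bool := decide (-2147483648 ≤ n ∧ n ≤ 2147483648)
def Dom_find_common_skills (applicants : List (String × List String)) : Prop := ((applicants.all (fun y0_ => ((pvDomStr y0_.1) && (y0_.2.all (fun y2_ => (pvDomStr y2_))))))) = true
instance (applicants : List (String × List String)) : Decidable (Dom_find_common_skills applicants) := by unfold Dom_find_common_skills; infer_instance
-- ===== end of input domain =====

-- B replaces A's applicant-major loop of repeated set rebuilds by a single skill-major
-- filter of the first applicant's skills with an all() check over the remaining lists (simpler).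

-- ===== PORT A =====
-- A: fold over the applicants' value lists; None start, first list becomes the set,
-- each later list rebuilds the running set by an inner loop keeping members of that list.
def find_common_skills (applicants : List (String × List String)) : Option (List String) :=
  applicants.foldl
    (fun (common_skills : Option (PySem.Set String)) kv =>
      match common_skills with
      | none => some (PySem.Set.ofList kv.2)
      | some c =>
          some (c.foldl
            (fun (new_common : PySem.Set String) skill =>
              if skill ∈ kv.2 then PySem.Set.add new_common skill else new_common)
            PySem.Set.empty))
    none

-- ===== PORT B =====
-- B: empty dict → none; else filter the first list's skills (building a set, as the
-- Python set comprehension does) by membership in every remaining list.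
def find_common_skills_alt (applicants : List (String × List String)) : Option (List String) :=
  match applicants with
  | [] => none
  | kv :: restPairs =>
      let rest := restPairs.map Prod.snd
      some (kv.2.foldl
        (fun (acc : PySem.Set String) skill =>
          if rest.all (fun skills => decide (skill ∈ skills)) then PySem.Set.add acc skill else acc)
        PySem.Set.empty)

-- ===== PRECONDITION & SPEC =====
def Spec_find_common_skills (applicants : List (String × List String)) (out : Option (List String)) : Prop := out = find_common_skills_alt applicants
instance (applicants : List (String × List String)) (out : Option (List String)) : Decidable (Spec_find_common_skills applicants out) := by unfold Spec_find_common_skills; infer_instance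

-- ===== CLAIM (what is proved, stated in full; the proofs are below) =====
def Claim_equal_find_common_skills : Prop := ∀ (applicants : List (String × List String)), Dom_find_common_skills applicants → Spec_find_common_skills applicants (find_common_skills applicants)

-- ===== LEMMAS AND PROOFS =====

-- conditional-add fold = fold of add over the filtered list
theorem foldl_addif_eq_filter_foldl (q : String → Bool) :
    ∀ (l : List String) (acc : PySem.Set String),
      l.foldl (fun a x => if q x then PySem.Set.add a x else a) acc
        = (l.filter q).foldl PySem.Set.add acc := by
  intro l
  induction l with
  | nil => intro acc; rfl
  | cons x xs ih =>
      intro acc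
      by_cases h : q x = true
      · simp [List.foldl, h, ih]
      · simp [List.foldl, h, ih]

-- dedup commutes with filter (first-occurrence order)
theorem ofList_filter (q : String → Bool) :
    ∀ l : List String, PySem.Set.ofList (l.filter q) = (PySem.Set.ofList l).filter q := by
  intro l
  induction l using List.reverseRecOn with
  | nil => rfl
  | append_singleton xs x ih =>
      by_cases hq : q x = true
      · simp only [List.filter_append, List.filter_cons, hq, if_pos, List.filter_nil]
        rw [PySem.Set.ofList_append_singleton,
            PySem.Set.ofList_append_singleton, ih]
        by_cases hm : x ∈ PySem.Set.ofList xs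
        · rw [PySem.Set.add_of_mem hm, PySem.Set.add_of_mem]
          exact List.mem_filter.mpr ⟨hm, hq⟩
        · rw [PySem.Set.add_of_not_mem hm, PySem.Set.add_of_not_mem, List.filter_append,
              List.filter_cons]
          · simp [hq]
          · intro hc; exact hm (List.mem_filter.mp hc).1
      · simp only [List.filter_append, List.filter_cons, hq, Bool.false_eq_true, if_false,
          List.filter_nil, List.append_nil, PySem.Set.ofList_append_singleton]
        rw [ih]
        by_cases hm : x ∈ PySem.Set.ofList xs
        · rw [PySem.Set.add_of_mem hm]
        · rw [PySem.Set.add_of_not_mem hm, List.filter_append, List.filter_cons]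
          simp [hq]

-- one inner-loop rebuild of A, on a duplicate-free set, is a filter
theorem setRebuild_eq_filter (skills : List String) (c : PySem.Set String) (hc : c.Nodup) :
    c.foldl (fun nc skill => if skill ∈ skills then PySem.Set.add nc skill else nc)
      PySem.Set.empty
      = c.filter (fun skill => decide (skill ∈ skills)) := by
  have h1 : c.foldl (fun nc skill => if skill ∈ skills then PySem.Set.add nc skill else nc)
      PySem.Set.empty
      = c.foldl (fun nc skill => if decide (skill ∈ skills) = true then PySem.Set.add nc skill else nc)
          PySem.Set.empty := by
    simp
  rw [h1, foldl_addif_eq_filter_foldl]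
  have h2 : (c.filter (fun skill => decide (skill ∈ skills))).foldl PySem.Set.add
      PySem.Set.empty
      = PySem.Set.ofList (c.filter (fun skill => decide (skill ∈ skills))) := rfl
  rw [h2]
  exact PySem.Set.ofList_eq_self_of_nodup _ (List.Nodup.filter _ hc)

-- A's outer fold over the remaining applicants, starting from a duplicate-free set
theorem foldA_eq_filter_all :
    ∀ (rest : List (String × List String)) (c : PySem.Set String), c.Nodup →
      rest.foldl
        (fun (common_skills : Option (PySem.Set String)) kv =>
          match common_skills with
          | none => some (PySem.Set.ofList kv.2)
          | some c =>
              some (c.foldl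
                (fun nc skill => if skill ∈ kv.2 then PySem.Set.add nc skill else nc)
                PySem.Set.empty))
        (some c)
        = some (c.filter (fun skill => rest.all (fun kv => decide (skill ∈ kv.2)))) := by
  intro rest
  induction rest with
  | nil => intro c _; simp
  | cons kv rest ih =>
      intro c hc
      simp only [List.foldl]
      rw [setRebuild_eq_filter kv.2 c hc,
          ih _ (List.Nodup.filter _ hc), List.filter_filter]
      congr 1
      apply List.filter_congr
      intro a _
      simp [Bool.and_comm]

-- ===== VERDICT (by name: the statement is the Claim_ definition above) =====
theorem find_common_skills_spec : Claim_equal_find_common_skills := by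
  intro applicants _
  unfold Spec_find_common_skills find_common_skills find_common_skills_alt
  cases applicants with
  | nil => rfl
  | cons kv rest =>
      simp only [List.foldl]
      rw [foldA_eq_filter_all rest (PySem.Set.ofList kv.2) (PySem.Set.nodup_ofList kv.2)]
      have h1 : kv.2.foldl
          (fun (acc : PySem.Set String) skill =>
            if (rest.map Prod.snd).all (fun skills => decide (skill ∈ skills)) then
              PySem.Set.add acc skill else acc) PySem.Set.empty
          = PySem.Set.ofList
              (kv.2.filter (fun skill => (rest.map Prod.snd).all (fun skills => decide (skill ∈ skills)))) := by
        rw [foldl_addif_eq_filter_foldl]; rfl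
      simp only [h1, ofList_filter]
      congr 2
      funext skill
      simp [List.all_map, Function.comp_def]
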